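-- pv_equiv track=rewrite | github.com/patdriscoll61/Practicals | Practical01/Prectical04Ext/memberwiseAddition.py | memberwiseAddition
-- ===== SOURCE A (Python) =====
-- def memberwiseAddition(list1, list2):
--     new_list = []
--     list_length = len(list1)
--     if len(list2) > list_length:
--         list_length = len(list2)
--     for i in range(list_length):
--         number1 = 0
--         number2 = 0
--         if i <= len(list1)-1:
--             number1 = list1[i]
--         if i <= len(list2)-1:
--             number2 = list2[i]
--         sum = number1 + number2
--         new_list.append(sum)
--     return new_list
-- ===== SOURCE B (Python) =====
-- def memberwiseAddition(list1, list2):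
--     # copy the longer list, then accumulate the shorter one into it in place
--     if len(list1) >= len(list2):
--         base, other = list1, list2
--     else:
--         base, other = list2, list1
--     result = list(base)
--     for i, x in enumerate(other):
--         result[i] += x
--     return result
-- ===== Notes on version B (the rewrite author's own statement) =====
-- stated objective: alternative
-- what changed: B copies the longer list wholesale and then accumulates the shorter list into it in place over enumerate(shorter), instead of A's single indexed loop to the max length with per-element bounds checks and zero defaults.
import Mathlib
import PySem

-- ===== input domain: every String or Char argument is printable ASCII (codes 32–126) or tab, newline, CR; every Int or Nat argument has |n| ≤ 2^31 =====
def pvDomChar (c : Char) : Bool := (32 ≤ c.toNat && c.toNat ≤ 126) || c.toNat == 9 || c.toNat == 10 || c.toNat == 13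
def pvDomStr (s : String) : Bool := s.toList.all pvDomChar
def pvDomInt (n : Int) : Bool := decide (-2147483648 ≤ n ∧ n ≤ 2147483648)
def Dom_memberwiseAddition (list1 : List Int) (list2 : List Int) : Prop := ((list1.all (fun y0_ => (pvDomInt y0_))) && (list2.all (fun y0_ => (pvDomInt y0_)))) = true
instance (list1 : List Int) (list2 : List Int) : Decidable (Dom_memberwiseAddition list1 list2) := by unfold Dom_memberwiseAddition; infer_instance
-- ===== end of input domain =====

-- B copies the longer list and accumulates the shorter one into it in place, instead of A's indexed loop to the max length with bounds checks; objective: alternative.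

-- ===== PORT A =====
def memberwiseAddition (list1 : List Int) (list2 : List Int) : List Int :=
  let listLength : Int :=
    if (list2.length : Int) > (list1.length : Int) then (list2.length : Int)
    else (list1.length : Int)
  (PySem.List.pyRange 0 listLength 1).foldl (fun newList i =>
    let number1 : Int := if i ≤ (list1.length : Int) - 1 then PySem.List.pyGetD list1 i 0 else 0
    let number2 : Int := if i ≤ (list2.length : Int) - 1 then PySem.List.pyGetD list2 i 0 else 0
    newList ++ [number1 + number2]) []

-- ===== PORT B =====
-- copy the longer list, then 'for i, x in enumerate(other): result[i] += x'
def memberwiseAddition_alt (list1 : List Int) (list2 : List Int) : List Int :=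
  let p : List Int × List Int :=
    if list1.length ≥ list2.length then (list1, list2) else (list2, list1)
  (PySem.List.enumerate p.2 0).foldl
    (fun result ix =>
      PySem.List.pySetD result ix.1 (PySem.List.pyGetD result ix.1 0 + ix.2)) p.1

-- ===== PRECONDITION & SPEC =====
def Spec_memberwiseAddition (list1 : List Int) (list2 : List Int) (out : List Int) : Prop := out = memberwiseAddition_alt list1 list2
instance (list1 : List Int) (list2 : List Int) (out : List Int) : Decidable (Spec_memberwiseAddition list1 list2 out) := by unfold Spec_memberwiseAddition; infer_instance

-- ===== CLAIM =====
def Claim_equal_memberwiseAddition : Prop := ∀ (list1 : List Int) (list2 : List Int), Dom_memberwiseAddition list1 list2 → Spec_memberwiseAddition list1 list2 (memberwiseAddition list1 list2)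

-- ===== LEMMAS AND PROOFS =====

-- A equals the range-free characterisation
lemma memberwiseAddition_eq_map (l1 l2 : List Int) :
    memberwiseAddition l1 l2 =
      (List.range (max l1.length l2.length)).map (fun k => l1.getD k 0 + l2.getD k 0) := by
  unfold memberwiseAddition
  rw [PySem.List.foldl_append_singleton_eq_map, PySem.List.pyRange_one]
  have hlen : (if (l2.length : Int) > (l1.length : Int) then (l2.length : Int)
      else (l1.length : Int)) = ((max l1.length l2.length : Nat) : Int) := by
    split <;> omega
  rw [hlen]
  simp only [sub_zero, Int.toNat_natCast, List.map_map]
  apply List.map_congr_left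
  intro k hk
  simp only [List.mem_range] at hk
  simp only [Function.comp_def, zero_add]
  congr 1
  · by_cases h : k < l1.length
    · rw [if_pos (by omega), PySem.List.pyGetD_natCast]
    · rw [if_neg (by omega)]
      simp [List.getD, List.getElem?_eq_none_iff.mpr (by omega : l1.length ≤ k)]
  · by_cases h : k < l2.length
    · rw [if_pos (by omega), PySem.List.pyGetD_natCast]
    · rw [if_neg (by omega)]
      simp [List.getD, List.getElem?_eq_none_iff.mpr (by omega : l2.length ≤ k)]

-- B's accumulation loop, with offset, equals the same characterisation
lemma addInto_eq_map (other : List Int) (base : List Int) (n : Nat)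
    (h : n + other.length ≤ base.length) :
    (PySem.List.enumerate other (n : Int)).foldl
      (fun result ix =>
        PySem.List.pySetD result ix.1 (PySem.List.pyGetD result ix.1 0 + ix.2)) base
    = (List.range base.length).map
        (fun k => base.getD k 0 + (if n ≤ k then other.getD (k - n) 0 else 0)) := by
  induction other generalizing base n with
  | nil =>
    simp only [PySem.List.enumerate_nil, List.foldl_nil, List.getD_nil, ite_self, add_zero]
    refine (List.ext_getElem (by simp) ?_).symm
    intro k h1 h2
    simp only [List.getElem_map, List.getElem_range]
    rw [List.getD_eq_getElem _ _ (by simpa using h2)]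
  | cons a as ih =>
    have hn : n < base.length := by simp at h; omega
    rw [PySem.List.enumerate_cons, List.foldl_cons]
    have hstep :
        PySem.List.pySetD base (n : Int) (PySem.List.pyGetD base (n : Int) 0 + a)
          = base.set n (base.getD n 0 + a) := by
      rw [PySem.List.pySetD_natCast, PySem.List.pyGetD_natCast]
    have hcast : ((n : Int) + 1) = ((n + 1 : Nat) : Int) := by push_cast; ring
    rw [hstep, hcast, ih (base.set n (base.getD n 0 + a)) (n + 1)
      (by simp at h ⊢; omega)]
    rw [List.length_set]
    apply List.map_congr_left
    intro k hk
    simp only [List.mem_range] at hk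
    have hgetD : (base.set n (base.getD n 0 + a)).getD k 0 =
        if k = n then base.getD n 0 + a else base.getD k 0 := by
      simp only [List.getD]
      rw [List.getElem?_set]
      by_cases hkn2 : k = n
      · subst hkn2; simp [hn]
      · rw [if_neg (by omega), if_neg hkn2]
    rw [hgetD]
    by_cases hkn : k = n
    · subst hkn
      rw [if_pos rfl, if_neg (by omega), if_pos (le_refl _)]
      simp
    · rw [if_neg hkn]
      by_cases hlt : k < n
      · rw [if_neg (by omega), if_neg (by omega)]
      · have hk1 : n + 1 ≤ k := by omega
        rw [if_pos hk1, if_pos (by omega)]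
        have : k - n = (k - (n + 1)) + 1 := by omega
        rw [this]
        rfl

-- ===== VERDICT =====
theorem memberwiseAddition_spec : Claim_equal_memberwiseAddition := by
  intro l1 l2 _
  unfold Spec_memberwiseAddition memberwiseAddition_alt
  rw [memberwiseAddition_eq_map]
  by_cases h : l1.length ≥ l2.length
  · rw [if_pos h]
    show _ = (PySem.List.enumerate l2 0).foldl
      (fun result ix => PySem.List.pySetD result ix.1 (PySem.List.pyGetD result ix.1 0 + ix.2)) l1
    have he := addInto_eq_map l2 l1 0 (by omega)
    rw [Nat.cast_zero] at he
    rw [he, Nat.max_eq_left h]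
    apply List.map_congr_left
    intro k _
    simp
  · rw [if_neg h]
    show _ = (PySem.List.enumerate l1 0).foldl
      (fun result ix => PySem.List.pySetD result ix.1 (PySem.List.pyGetD result ix.1 0 + ix.2)) l2
    have he := addInto_eq_map l1 l2 0 (by omega)
    rw [Nat.cast_zero] at he
    rw [he]
    have hmax : max l1.length l2.length = l2.length := by omega
    rw [hmax]
    apply List.map_congr_left
    intro k _
    simp [add_comm]
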